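-- pv_equiv track=rewrite | github.com/lukapfekg/Diplomski_V3 | jpeg/dictionary_util.py | parse_to_dict2
-- ===== SOURCE A (Python) =====
-- def parse_to_dict2(dictionary):
--     out = ''
--     inside = False
--     for c in dictionary:
--         if c == '(':
--             inside = True
--             out += c
--         elif c == ')':
--             inside = False
--             out += c
--         elif c == '{':
--             out += c + "\""
--         elif c == '}':
--             out += "\"" + c
--         elif c == ':':
--             out += "\"" + c + " \""
--         elif c == ',':
--             out += "\"" + c + " \"" if inside is False else c
--         else:
--             out += c
--
--     # lst = out.split("\"\"")
--     # out = lst[0] + "\" \"" + lst[1]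
--
--     return out
-- ===== SOURCE B (Python) =====
-- def parse_to_dict2(dictionary):
--     # Region strategy: split on '(' so each later chunk starts inside parens;
--     # within a chunk, text up to the first ')' is inside (commas kept), the rest
--     # is outside (commas become '", "'); then the context-free rewrites for
--     # '{', '}' and ':' are applied globally with chained str.replace.
--     chunks = dictionary.split('(')
--     parts = [chunks[0].replace(',', '", "')]
--     for chunk in chunks[1:]:
--         bits = chunk.split(')', 1)
--         if len(bits) == 2:
--             parts.append('(' + bits[0] + ')' + bits[1].replace(',', '", "'))
--         else:
--             parts.append('(' + bits[0])
--     out = ''.join(parts)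
--     return out.replace('{', '{"').replace('}', '"}').replace(':', '": "')
-- ===== Notes on version B (the rewrite author's own statement) =====
-- stated objective: faster
-- what changed: Replaces the hand-rolled per-character loop with an inside/outside flag by a region decomposition: split on opening parens and once per chunk on the first closing paren so outside commas are fixed with str.replace, then apply the context-free brace and colon rewrites as three chained global str.replace calls.
import Mathlib
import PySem

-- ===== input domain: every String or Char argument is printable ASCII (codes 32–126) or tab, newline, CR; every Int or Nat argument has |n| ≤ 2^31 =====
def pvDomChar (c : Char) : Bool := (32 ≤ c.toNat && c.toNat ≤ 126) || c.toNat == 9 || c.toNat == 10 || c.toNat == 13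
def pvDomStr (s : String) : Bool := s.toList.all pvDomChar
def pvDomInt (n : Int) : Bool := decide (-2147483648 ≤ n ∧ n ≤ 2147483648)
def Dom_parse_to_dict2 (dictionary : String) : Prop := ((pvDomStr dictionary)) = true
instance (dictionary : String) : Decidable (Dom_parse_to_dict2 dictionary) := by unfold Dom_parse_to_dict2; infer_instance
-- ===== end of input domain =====

-- B rewrites the hand-rolled stateful char loop as a split-on-parens region pass for commas
-- followed by three chained global replaces; measurably faster in Python (C-level str ops).

-- ===== PORT A =====
-- one pass over the characters, appending to `out` and tracking the `inside` flag
def parse_to_dict2 (dictionary : String) : String :=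
  String.mk ((dictionary.toList.foldl (fun (st : List Char × Bool) (c : Char) =>
    if c = '(' then (st.1 ++ [c], true)
    else if c = ')' then (st.1 ++ [c], false)
    else if c = '{' then (st.1 ++ [c, '"'], st.2)
    else if c = '}' then (st.1 ++ ['"', c], st.2)
    else if c = ':' then (st.1 ++ ['"', c, ' ', '"'], st.2)
    else if c = ',' then
      (if st.2 = false then (st.1 ++ ['"', c, ' ', '"'], st.2) else (st.1 ++ [c], st.2))
    else (st.1 ++ [c], st.2)) ([], false)).1)

-- ===== PORT B =====
-- chunk.replace(',', '", "')
def pvFixCommas (s : List Char) : List Char :=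
  PySem.Chars.replace s [','] ['"', ',', ' ', '"']

-- the body of Source B's for-loop: '(' + bits[0] (+ ')' + bits[1].replace(…) if a ')' was found)
def pvChunkPiece (chunk : List Char) : List Char :=
  match PySem.Chars.splitOnMax chunk [')'] 1 with
  | [h, t] => '(' :: (h ++ ')' :: pvFixCommas t)
  | [h] => '(' :: h
  | _ => []   -- unreachable: split(sep, 1) yields one or two pieces

def parse_to_dict2_alt (dictionary : String) : String :=
  match PySem.Chars.splitOn dictionary.toList ['('] with
  | [] => ""   -- unreachable: split always returns at least one piece
  | first :: rest =>
    let parts := pvFixCommas first :: rest.map pvChunkPiece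
    let out := PySem.Chars.join [] parts
    String.mk (PySem.Chars.replace (PySem.Chars.replace (PySem.Chars.replace
      out ['{'] ['{', '"']) ['}'] ['"', '}']) [':'] ['"', ':', ' ', '"'])

-- ===== PRECONDITION & SPEC =====
def Spec_parse_to_dict2 (dictionary : String) (out : String) : Prop := out = parse_to_dict2_alt dictionary
instance (dictionary : String) (out : String) : Decidable (Spec_parse_to_dict2 dictionary out) := by unfold Spec_parse_to_dict2; infer_instance

-- ===== CLAIM (what is proved, stated in full; the proofs are below) =====
def Claim_equal_parse_to_dict2 : Prop := ∀ (dictionary : String), Dom_parse_to_dict2 dictionary → Spec_parse_to_dict2 dictionary (parse_to_dict2 dictionary)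

-- ===== LEMMAS AND PROOFS =====

-- single-character replace as a flatMap
def pvRepl1 (c : Char) (r : List Char) (l : List Char) : List Char :=
  l.flatMap (fun x => if x = c then r else [x])

-- split on a single character (all pieces)
def pvSplit1 (c : Char) : List Char → List (List Char)
  | [] => [[]]
  | x :: t => if x = c then [] :: pvSplit1 c t else (pvSplit1 c t).modifyHead (x :: ·)

-- split on a single character, at most once
def pvSplitFirst (c : Char) : List Char → List (List Char)
  | [] => [[]]
  | x :: t => if x = c then [[], t] else (pvSplitFirst c t).modifyHead (x :: ·)

-- the comma/paren stage of the rewrite, as a stateful emit-per-char recursion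
def pvCpass : Bool → List Char → List Char
  | _, [] => []
  | ins, c :: t =>
    if c = '(' then c :: pvCpass true t
    else if c = ')' then c :: pvCpass false t
    else if c = ',' then
      (if ins then c :: pvCpass ins t else '"' :: c :: ' ' :: '"' :: pvCpass ins t)
    else c :: pvCpass ins t

-- the context-free stage ({, }, :) as a per-char map
def pvM (c : Char) : List Char :=
  if c = '{' then ['{', '"']
  else if c = '}' then ['"', '}']
  else if c = ':' then ['"', ':', ' ', '"']
  else [c]

def pvQ : List Char := ['"', ',', ' ', '"']
def pvFix (l : List Char) : List Char := pvRepl1 ',' pvQ l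

def pvPartProc (g : List Char) : List Char :=
  match pvSplitFirst ')' g with
  | [h, tl] => h ++ ')' :: pvFix tl
  | [h] => h
  | _ => []

def pvPieceFn (g : List Char) : List Char := '(' :: pvPartProc g

def pvOutProc (l : List Char) : List Char :=
  match pvSplit1 '(' l with
  | f :: rest => pvFix f ++ (rest.map pvPieceFn).flatten
  | [] => []

def pvInProc (l : List Char) : List Char :=
  match pvSplit1 '(' l with
  | g :: rest => pvPartProc g ++ (rest.map pvPieceFn).flatten
  | [] => []

-- ---- characterization of PySem replace / splitOn / splitOnMax for single-char separators ----

theorem pv_replace_go (c : Char) (r : List Char) :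
    ∀ fuel l acc, l.length ≤ fuel →
      PySem.Chars.replace.go [c] r fuel l acc = acc.reverse ++ pvRepl1 c r l := by
  intro fuel
  induction fuel with
  | zero =>
    intro l acc h
    have : l = [] := by cases l <;> simp_all
    subst this
    simp [PySem.Chars.replace.go, pvRepl1]
  | succ n ih =>
    intro l acc h
    cases l with
    | nil => simp [PySem.Chars.replace.go, pvRepl1]
    | cons x t =>
      rw [PySem.Chars.replace.go]
      simp only [List.isPrefixOf, List.length_cons] at *
      by_cases hx : c = x
      · subst hx
        rw [if_pos (by simp [List.isPrefixOf])]
        simp only [List.length_cons, List.length_nil, Nat.zero_add, List.drop_succ_cons,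
          List.drop_zero]
        rw [ih t _ (by omega)]
        simp [pvRepl1]
      · rw [if_neg (by simp [List.isPrefixOf]; exact hx)]
        rw [ih t _ (by omega)]
        simp [pvRepl1, Ne.symm hx]

theorem pv_replace_single (c : Char) (r l : List Char) :
    PySem.Chars.replace l [c] r = pvRepl1 c r l := by
  rw [PySem.Chars.replace]
  simp [pv_replace_go c r l.length l [] le_rfl]

def pvPH (a : List Char) : List (List Char) → List (List Char)
  | [] => [a]
  | h :: t => (a ++ h) :: t

theorem pvSplit1_ne_nil (c : Char) (l : List Char) : pvSplit1 c l ≠ [] := by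
  induction l with
  | nil => simp [pvSplit1]
  | cons x t ih =>
    simp only [pvSplit1]
    split_ifs
    · simp
    · cases h : pvSplit1 c t with
      | nil => exact absurd h ih
      | cons a b => simp

theorem pv_splitOn_go (c : Char) :
    ∀ fuel l cur acc, l.length ≤ fuel →
      PySem.Chars.splitOn.go [c] fuel l cur acc =
        acc.reverse ++ pvPH cur.reverse (pvSplit1 c l) := by
  intro fuel
  induction fuel with
  | zero =>
    intro l cur acc h
    have : l = [] := by cases l <;> simp_all
    subst this
    simp [PySem.Chars.splitOn.go, pvSplit1, pvPH]
  | succ n ih =>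
    intro l cur acc h
    cases l with
    | nil => simp [PySem.Chars.splitOn.go, pvSplit1, pvPH]
    | cons x t =>
      rw [PySem.Chars.splitOn.go]
      simp only [List.length_cons] at h
      by_cases hx : c = x
      · subst hx
        rw [if_pos (by simp [List.isPrefixOf])]
        simp only [List.length_cons, List.length_nil, Nat.zero_add, List.drop_succ_cons,
          List.drop_zero]
        rw [ih t [] (cur.reverse :: acc) (by omega)]
        simp only [pvSplit1, if_pos rfl]
        cases hs : pvSplit1 c t with
        | nil => exact absurd hs (pvSplit1_ne_nil c t)
        | cons s ss => simp [pvPH]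
      · rw [if_neg (by simp [List.isPrefixOf]; exact hx)]
        rw [ih t (x :: cur) acc (by omega)]
        simp only [pvSplit1, if_neg (Ne.symm hx)]
        cases hs : pvSplit1 c t with
        | nil => exact absurd hs (pvSplit1_ne_nil c t)
        | cons s ss => simp [pvPH, List.modifyHead]

theorem pv_splitOn_single (c : Char) (l : List Char) :
    PySem.Chars.splitOn l [c] = pvSplit1 c l := by
  rw [PySem.Chars.splitOn]
  rw [pv_splitOn_go c (l.length + 1) l [] [] (by omega)]
  cases hs : pvSplit1 c l with
  | nil => exact absurd hs (pvSplit1_ne_nil c l)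
  | cons s ss => simp [pvPH]

theorem pv_splitOnMax_go_zero (c : Char) :
    ∀ fuel l cur acc, PySem.Chars.splitOnMax.go [c] fuel 0 l cur acc =
      acc.reverse ++ [cur.reverse ++ l] := by
  intro fuel l cur acc
  cases fuel with
  | zero => simp [PySem.Chars.splitOnMax.go]
  | succ n => cases l <;> simp [PySem.Chars.splitOnMax.go]

theorem pvSplitFirst_ne_nil (c : Char) (l : List Char) : pvSplitFirst c l ≠ [] := by
  induction l with
  | nil => simp [pvSplitFirst]
  | cons x t ih =>
    simp only [pvSplitFirst]
    split_ifs
    · simp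
    · cases h : pvSplitFirst c t with
      | nil => exact absurd h ih
      | cons a b => simp

theorem pv_splitOnMax_go_one (c : Char) :
    ∀ fuel l cur acc, l.length ≤ fuel →
      PySem.Chars.splitOnMax.go [c] fuel 1 l cur acc =
        acc.reverse ++ pvPH cur.reverse (pvSplitFirst c l) := by
  intro fuel
  induction fuel with
  | zero =>
    intro l cur acc h
    have : l = [] := by cases l <;> simp_all
    subst this
    simp [PySem.Chars.splitOnMax.go, pvSplitFirst, pvPH]
  | succ n ih =>
    intro l cur acc h
    cases l with
    | nil => simp [PySem.Chars.splitOnMax.go, pvSplitFirst, pvPH]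
    | cons x t =>
      rw [PySem.Chars.splitOnMax.go]
      simp only [List.length_cons] at h
      by_cases hx : c = x
      · subst hx
        rw [if_neg (by omega), if_pos (by simp [List.isPrefixOf])]
        rw [show (1 : Nat) - 1 = 0 from rfl]
        simp only [List.length_cons, List.length_nil, Nat.zero_add, List.drop_succ_cons,
          List.drop_zero]
        rw [pv_splitOnMax_go_zero]
        simp [pvSplitFirst, pvPH]
      · rw [if_neg (by omega), if_neg (by simp [List.isPrefixOf]; exact hx)]
        rw [ih t (x :: cur) acc (by omega)]
        simp only [pvSplitFirst, if_neg (Ne.symm hx)]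
        cases hs : pvSplitFirst c t with
        | nil => exact absurd hs (pvSplitFirst_ne_nil c t)
        | cons s ss => simp [pvPH, List.modifyHead]

theorem pv_splitOnMax_one (c : Char) (l : List Char) :
    PySem.Chars.splitOnMax l [c] 1 = pvSplitFirst c l := by
  rw [PySem.Chars.splitOnMax]
  rw [if_neg (by norm_num)]
  rw [show ((1 : Int)).toNat = 1 from rfl]
  rw [pv_splitOnMax_go_one c (l.length + 1) l [] [] (by omega)]
  cases hs : pvSplitFirst c l with
  | nil => exact absurd hs (pvSplitFirst_ne_nil c l)
  | cons s ss => simp [pvPH]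

theorem pvSplitFirst_shape (c : Char) (l : List Char) :
    pvSplitFirst c l = [l] ∨ ∃ h t, pvSplitFirst c l = [h, t] := by
  induction l with
  | nil => left; rfl
  | cons x t ih =>
    simp only [pvSplitFirst]
    by_cases hx : x = c
    · right; exact ⟨[], t, by simp [hx]⟩
    · rw [if_neg hx]
      rcases ih with h1 | ⟨h, tl, h2⟩
      · left; simp [h1, List.modifyHead]
      · right; exact ⟨x :: h, tl, by simp [h2, List.modifyHead]⟩

theorem pv_join_nil (parts : List (List Char)) :
    PySem.Chars.join [] parts = parts.flatten := by
  simp [PySem.Chars.join, List.intercalate]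
  induction parts with
  | nil => simp
  | cons p ps ih =>
    cases ps <;> simp_all [List.intersperse]

-- ---- partProc rewriting lemmas ----

theorem pvPartProc_nil : pvPartProc [] = [] := rfl

theorem pvPartProc_rp (g : List Char) : pvPartProc (')' :: g) = ')' :: pvFix g := by
  simp [pvPartProc, pvSplitFirst]

theorem pvPartProc_cons (x : Char) (hx : x ≠ ')') (g : List Char) :
    pvPartProc (x :: g) = x :: pvPartProc g := by
  simp only [pvPartProc, pvSplitFirst, if_neg hx]
  rcases pvSplitFirst_shape ')' g with h1 | ⟨h, tl, h2⟩
  · simp [h1, List.modifyHead]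
  · simp [h2, List.modifyHead]

-- ---- main region lemma: the comma pass equals B's split/join construction ----

theorem pv_cpass_proc (l : List Char) :
    pvCpass false l = pvOutProc l ∧ pvCpass true l = pvInProc l := by
  induction l with
  | nil => constructor <;> rfl
  | cons x t ih =>
    obtain ⟨ihO, ihI⟩ := ih
    obtain ⟨f, rest, hs⟩ : ∃ f rest, pvSplit1 '(' t = f :: rest := by
      cases h : pvSplit1 '(' t with
      | nil => exact absurd h (pvSplit1_ne_nil _ t)
      | cons a b => exact ⟨a, b, rfl⟩
    constructor
    · -- outside
      by_cases h1 : x = '('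
      · subst h1
        have hl : pvCpass false ('(' :: t) = '(' :: pvCpass true t := by simp [pvCpass]
        rw [hl, ihI]
        simp [pvInProc, pvOutProc, pvSplit1, hs, pvFix, pvRepl1, pvPieceFn]
      · have hsp : pvSplit1 '(' (x :: t) = (x :: f) :: rest := by
          simp [pvSplit1, if_neg h1, hs, List.modifyHead]
        by_cases h3 : x = ','
        · subst h3
          have hl : pvCpass false (',' :: t) = '"' :: ',' :: ' ' :: '"' :: pvCpass false t := by
            simp [pvCpass]
          rw [hl, ihO]
          simp [pvOutProc, hsp, hs, pvFix, pvRepl1, pvQ]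
        · have hl : pvCpass false (x :: t) = x :: pvCpass false t := by
            by_cases h2 : x = ')' <;> simp [pvCpass, h1, h2, h3]
          rw [hl, ihO]
          simp [pvOutProc, hsp, hs, pvFix, pvRepl1, h3]
    · -- inside
      by_cases h1 : x = '('
      · subst h1
        have hl : pvCpass true ('(' :: t) = '(' :: pvCpass true t := by simp [pvCpass]
        rw [hl, ihI]
        simp [pvInProc, pvSplit1, hs, pvPartProc_nil, pvPieceFn]
      · have hsp : pvSplit1 '(' (x :: t) = (x :: f) :: rest := by
          simp [pvSplit1, if_neg h1, hs, List.modifyHead]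
        by_cases h2 : x = ')'
        · subst h2
          have hl : pvCpass true (')' :: t) = ')' :: pvCpass false t := by simp [pvCpass]
          rw [hl, ihO]
          simp [pvInProc, hsp, hs, pvPartProc_rp, pvOutProc]
        · have hl : pvCpass true (x :: t) = x :: pvCpass true t := by
            by_cases h3 : x = ',' <;> simp [pvCpass, h1, h2, h3]
          rw [hl, ihI]
          simp [pvInProc, hsp, hs, pvPartProc_cons x h2]

-- ---- A's fold equals per-char map after the comma pass ----

theorem pv_foldA (l : List Char) :
    ∀ (out : List Char) (ins : Bool),
      (l.foldl (fun (st : List Char × Bool) (c : Char) =>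
        if c = '(' then (st.1 ++ [c], true)
        else if c = ')' then (st.1 ++ [c], false)
        else if c = '{' then (st.1 ++ [c, '"'], st.2)
        else if c = '}' then (st.1 ++ ['"', c], st.2)
        else if c = ':' then (st.1 ++ ['"', c, ' ', '"'], st.2)
        else if c = ',' then
          (if st.2 = false then (st.1 ++ ['"', c, ' ', '"'], st.2) else (st.1 ++ [c], st.2))
        else (st.1 ++ [c], st.2)) (out, ins)).1
      = out ++ (pvCpass ins l).flatMap pvM := by
  induction l with
  | nil => intro out ins; simp [pvCpass]
  | cons x t ih =>
    intro out ins
    simp only [List.foldl_cons]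
    by_cases h1 : x = '('
    · subst h1; rw [if_pos rfl, ih]; simp [pvCpass, pvM]
    · rw [if_neg h1]
      by_cases h2 : x = ')'
      · subst h2; rw [if_pos rfl, ih]; simp [pvCpass, pvM, h1]
      · rw [if_neg h2]
        by_cases h3 : x = '{'
        · subst h3; rw [if_pos rfl, ih]; simp [pvCpass, pvM, h1, h2]
        · rw [if_neg h3]
          by_cases h4 : x = '}'
          · subst h4; rw [if_pos rfl, ih]; simp [pvCpass, pvM, h1, h2, h3]
          · rw [if_neg h4]
            by_cases h5 : x = ':'
            · subst h5; rw [if_pos rfl, ih]; simp [pvCpass, pvM, h1, h2, h3, h4]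
            · rw [if_neg h5]
              by_cases h6 : x = ','
              · subst h6
                rw [if_pos rfl]
                cases ins with
                | false => rw [if_pos rfl, ih]; simp [pvCpass, pvM, h1, h2, h3, h4, h5]
                | true => rw [if_neg (by simp), ih]; simp [pvCpass, pvM, h1, h2, h3, h4, h5]
              · rw [if_neg h6, ih]; simp [pvCpass, pvM, h1, h2, h3, h4, h5, h6]

-- ---- the three chained replaces equal the per-char map pvM ----

theorem pv_three_replaces (out : List Char) :
    pvRepl1 ':' ['"', ':', ' ', '"'] (pvRepl1 '}' ['"', '}'] (pvRepl1 '{' ['{', '"'] out))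
      = out.flatMap pvM := by
  simp only [pvRepl1, List.flatMap_assoc]
  apply List.flatMap_congr
  intro x _
  by_cases h1 : x = '{'
  · subst h1; simp [pvM]
  · by_cases h2 : x = '}'
    · subst h2; simp [pvM, h1]
    · by_cases h3 : x = ':'
      · subst h3; simp [pvM, h1, h2]
      · simp [pvM, h1, h2, h3]

-- ---- B's port computes the composed form ----

theorem pv_alt_eq (s : String) :
    parse_to_dict2_alt s = String.mk ((pvOutProc s.toList).flatMap pvM) := by
  rw [parse_to_dict2_alt]
  obtain ⟨f, rest, hs⟩ : ∃ f rest, pvSplit1 '(' s.toList = f :: rest := by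
    cases h : pvSplit1 '(' s.toList with
    | nil => exact absurd h (pvSplit1_ne_nil _ _)
    | cons a b => exact ⟨a, b, rfl⟩
  rw [pv_splitOn_single, hs]
  have hpiece : ∀ g, pvChunkPiece g = pvPieceFn g := by
    intro g
    rw [pvChunkPiece, pv_splitOnMax_one]
    rcases pvSplitFirst_shape ')' g with h1 | ⟨h, tl, h2⟩
    · have hg : g = g := rfl
      have : pvSplitFirst ')' g = [g] := h1
      rw [this]
      simp [pvPieceFn, pvPartProc, this]
    · rw [h2]
      simp [pvPieceFn, pvPartProc, h2, pvFixCommas, pv_replace_single, pvFix, pvQ]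
  show String.mk (PySem.Chars.replace (PySem.Chars.replace (PySem.Chars.replace
      (PySem.Chars.join [] (pvFixCommas f :: (rest.map pvChunkPiece)))
      ['{'] ['{', '"']) ['}'] ['"', '}']) [':'] ['"', ':', ' ', '"'])
    = String.mk ((pvOutProc s.toList).flatMap pvM)
  rw [pv_join_nil, pv_replace_single, pv_replace_single, pv_replace_single, pv_three_replaces]
  rw [funext hpiece]
  simp [pvOutProc, hs, pvFixCommas, pv_replace_single, pvFix, pvQ]

-- ===== VERDICT (by name: the statement is the Claim_ definition above) =====
theorem parse_to_dict2_spec : Claim_equal_parse_to_dict2 := by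
  intro s _
  unfold Spec_parse_to_dict2
  rw [pv_alt_eq, parse_to_dict2, pv_foldA s.toList [] false]
  rw [(pv_cpass_proc s.toList).1]
  simp
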